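-- pv_equiv track=rewrite | github.com/georkap/ego_md_mtl | src/utils/argparse_utils.py | parse_tasks_per_dataset
-- ===== SOURCE A (Python) =====
-- def parse_tasks_per_dataset(tasks_per_dataset):
--     objectives_text = "Objectives: "
--     num_coords = 0
--     num_objects = []
--     num_classes = []
--     num_obj_cat = []
--     num_cls_objectives = 0
--     num_g_objectives = 0
--     num_h_objectives = 0
--     num_o_objectives = 0
--     num_c_objectives = 0
--     for i, td in enumerate(tasks_per_dataset):
--         # parse the dictionary with the tasks
--         objectives_text += "\nDataset {}\n".format(i)
--         for key, value in td.items():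
--             if key == 'A':
--                 objectives_text += " actions {}, ".format(value)
--                 num_classes.append(value)
--                 num_cls_objectives += 1
--             elif key == 'V':
--                 objectives_text += " verbs {}, ".format(value)
--                 num_classes.append(value)
--                 num_cls_objectives += 1
--             elif key == 'N':
--                 objectives_text += " nouns {}, ".format(value)
--                 num_classes.append(value)
--                 num_cls_objectives += 1
--             elif key == 'L':
--                 objectives_text += " locations {}, ".format(value)
--                 num_classes.append(value)
--                 num_cls_objectives += 1
--             elif key == 'G':
--                 objectives_text += " gaze, "
--                 num_coords += 1
--                 num_g_objectives += 1
--             elif key == 'H':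
--                 objectives_text += " hands, "
--                 num_coords += 2
--                 num_h_objectives += 1
--             elif key == 'O':
--                 objectives_text += "objects {}, ".format(value)
--                 num_o_objectives += 1
--                 num_objects.append(value)
--             elif key == 'C':
--                 objectives_text += "object categories {}, ".format(value)
--                 num_c_objectives += 1
--                 num_obj_cat.append(value)
--             else:
--                 pass
--             # and an if clause for every new type of task
--     objectives = (num_cls_objectives, num_g_objectives, num_h_objectives, num_o_objectives, num_c_objectives)
--     task_sizes = (num_classes, num_coords, num_objects, num_obj_cat)
--     return objectives_text, objectives, task_sizes
-- ===== SOURCE B (Python) =====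
-- TEXT = {'A': " actions {}, ", 'V': " verbs {}, ", 'N': " nouns {}, ",
--         'L': " locations {}, ", 'G': " gaze, ", 'H': " hands, ",
--         'O': "objects {}, ", 'C': "object categories {}, "}
-- CLS_KEYS = ('A', 'V', 'N', 'L')
--
--
-- def parse_tasks_per_dataset(tasks_per_dataset):
--     objectives_text = "Objectives: " + "".join(
--         "\nDataset {}\n".format(i)
--         + "".join(TEXT[k].format(v) for k, v in td.items() if k in TEXT)
--         for i, td in enumerate(tasks_per_dataset))
--     items = [kv for td in tasks_per_dataset for kv in td.items()]
--     objectives = (sum(k in CLS_KEYS for k, _ in items),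
--                   sum(k == 'G' for k, _ in items),
--                   sum(k == 'H' for k, _ in items),
--                   sum(k == 'O' for k, _ in items),
--                   sum(k == 'C' for k, _ in items))
--     task_sizes = ([v for k, v in items if k in CLS_KEYS],
--                   sum(1 if k == 'G' else 2 for k, _ in items if k in ('G', 'H')),
--                   [v for k, v in items if k == 'O'],
--                   [v for k, v in items if k == 'C'])
--     return objectives_text, objectives, task_sizes
-- ===== Notes on version B (the rewrite author's own statement) =====
-- stated objective: idiomatic
-- what changed: Replaces the single stateful loop carrying ten accumulator variables with independent declarative passes: the text is a join over a template table, and each counter/list is its own comprehension over the flattened items.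
import Mathlib
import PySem

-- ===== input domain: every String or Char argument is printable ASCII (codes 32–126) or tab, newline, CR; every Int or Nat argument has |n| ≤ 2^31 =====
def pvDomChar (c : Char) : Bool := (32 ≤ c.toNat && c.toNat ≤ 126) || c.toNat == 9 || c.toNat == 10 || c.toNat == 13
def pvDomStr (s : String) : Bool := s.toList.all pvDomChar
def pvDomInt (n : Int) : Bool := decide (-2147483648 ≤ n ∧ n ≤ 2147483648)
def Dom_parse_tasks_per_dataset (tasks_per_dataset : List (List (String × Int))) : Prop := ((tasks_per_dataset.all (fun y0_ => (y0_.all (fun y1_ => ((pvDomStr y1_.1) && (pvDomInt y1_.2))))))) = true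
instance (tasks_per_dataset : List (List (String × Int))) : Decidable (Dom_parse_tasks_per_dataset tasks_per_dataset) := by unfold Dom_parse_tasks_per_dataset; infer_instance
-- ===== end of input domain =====

-- B replaces A's single stateful loop over ten accumulators by independent declarative passes
-- (a template table joined into the text, and a comprehension/count per output component); same cost, more idiomatic.

-- ===== PORT A =====
-- loop state: the ten accumulator variables of A
structure PvStA where
  text : String
  coords : Int
  objs : List Int
  classes : List Int
  cats : List Int
  cls : Int
  g : Int
  h : Int
  o : Int
  c : Int
deriving Repr, DecidableEq

def pvStepA (st : PvStA) (kv : String × Int) : PvStA :=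
  if kv.1 = "A" then { st with text := st.text ++ " actions " ++ PySem.Int.toStr kv.2 ++ ", ", classes := st.classes ++ [kv.2], cls := st.cls + 1 }
  else if kv.1 = "V" then { st with text := st.text ++ " verbs " ++ PySem.Int.toStr kv.2 ++ ", ", classes := st.classes ++ [kv.2], cls := st.cls + 1 }
  else if kv.1 = "N" then { st with text := st.text ++ " nouns " ++ PySem.Int.toStr kv.2 ++ ", ", classes := st.classes ++ [kv.2], cls := st.cls + 1 }
  else if kv.1 = "L" then { st with text := st.text ++ " locations " ++ PySem.Int.toStr kv.2 ++ ", ", classes := st.classes ++ [kv.2], cls := st.cls + 1 }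
  else if kv.1 = "G" then { st with text := st.text ++ " gaze, ", coords := st.coords + 1, g := st.g + 1 }
  else if kv.1 = "H" then { st with text := st.text ++ " hands, ", coords := st.coords + 2, h := st.h + 1 }
  else if kv.1 = "O" then { st with text := st.text ++ "objects " ++ PySem.Int.toStr kv.2 ++ ", ", o := st.o + 1, objs := st.objs ++ [kv.2] }
  else if kv.1 = "C" then { st with text := st.text ++ "object categories " ++ PySem.Int.toStr kv.2 ++ ", ", c := st.c + 1, cats := st.cats ++ [kv.2] }
  else st

def pvStepDs (st : PvStA) (p : Int × List (String × Int)) : PvStA :=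
  p.2.foldl pvStepA { st with text := st.text ++ "\nDataset " ++ PySem.Int.toStr p.1 ++ "\n" }

def parse_tasks_per_dataset (tasks_per_dataset : List (List (String × Int))) : String × (Int × Int × Int × Int × Int) × (List Int × Int × List Int × List Int) :=
  let st := (PySem.List.enumerate tasks_per_dataset 0).foldl pvStepDs ⟨"Objectives: ", 0, [], [], [], 0, 0, 0, 0, 0⟩
  (st.text, (st.cls, st.g, st.h, st.o, st.c), (st.classes, st.coords, st.objs, st.cats))

-- ===== PORT B =====
-- TEXT[k].format(v), none when k is not in the table (Source B's `if k in TEXT` filter)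
def pvTemplate (k : String) (v : Int) : Option String :=
  if k = "A" then some (" actions " ++ PySem.Int.toStr v ++ ", ")
  else if k = "V" then some (" verbs " ++ PySem.Int.toStr v ++ ", ")
  else if k = "N" then some (" nouns " ++ PySem.Int.toStr v ++ ", ")
  else if k = "L" then some (" locations " ++ PySem.Int.toStr v ++ ", ")
  else if k = "G" then some " gaze, "
  else if k = "H" then some " hands, "
  else if k = "O" then some ("objects " ++ PySem.Int.toStr v ++ ", ")
  else if k = "C" then some ("object categories " ++ PySem.Int.toStr v ++ ", ")
  else none

def pvClsKeys : List String := ["A", "V", "N", "L"]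

def parse_tasks_per_dataset_alt (tasks_per_dataset : List (List (String × Int))) : String × (Int × Int × Int × Int × Int) × (List Int × Int × List Int × List Int) :=
  let objectives_text := "Objectives: " ++ String.join ((PySem.List.enumerate tasks_per_dataset 0).map (fun p =>
      "\nDataset " ++ PySem.Int.toStr p.1 ++ "\n" ++ String.join (p.2.filterMap (fun kv => pvTemplate kv.1 kv.2))))
  let items := tasks_per_dataset.flatMap (fun td => td)
  let objectives := ((items.countP (fun kv => pvClsKeys.contains kv.1) : Int),
                     (items.countP (fun kv => kv.1 == "G") : Int),
                     (items.countP (fun kv => kv.1 == "H") : Int),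
                     (items.countP (fun kv => kv.1 == "O") : Int),
                     (items.countP (fun kv => kv.1 == "C") : Int))
  let task_sizes := (items.filterMap (fun kv => if pvClsKeys.contains kv.1 then some kv.2 else none),
                     ((items.filter (fun kv => kv.1 == "G" || kv.1 == "H")).map (fun kv => if kv.1 == "G" then (1:Int) else 2)).sum,
                     items.filterMap (fun kv => if kv.1 == "O" then some kv.2 else none),
                     items.filterMap (fun kv => if kv.1 == "C" then some kv.2 else none))
  (objectives_text, objectives, task_sizes)

-- ===== PRECONDITION & SPEC =====
def Spec_parse_tasks_per_dataset (tasks_per_dataset : List (List (String × Int))) (out : String × (Int × Int × Int × Int × Int) × (List Int × Int × List Int × List Int)) : Prop := out = parse_tasks_per_dataset_alt tasks_per_dataset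
instance (tasks_per_dataset : List (List (String × Int))) (out : String × (Int × Int × Int × Int × Int) × (List Int × Int × List Int × List Int)) : Decidable (Spec_parse_tasks_per_dataset tasks_per_dataset out) := by
  unfold Spec_parse_tasks_per_dataset
  haveI h1 : DecidableEq (Int × Int × Int × Int × Int) := inferInstance
  haveI h2 : DecidableEq (List Int × Int × List Int × List Int) := inferInstance
  haveI h3 : DecidableEq ((Int × Int × Int × Int × Int) × (List Int × Int × List Int × List Int)) := instDecidableEqProd
  haveI h4 : DecidableEq (String × (Int × Int × Int × Int × Int) × (List Int × Int × List Int × List Int)) := instDecidableEqProd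
  infer_instance

-- ===== CLAIM (what is proved, stated in full; the proofs are below) =====
def Claim_equal_parse_tasks_per_dataset : Prop := ∀ (tasks_per_dataset : List (List (String × Int))), Dom_parse_tasks_per_dataset tasks_per_dataset → Spec_parse_tasks_per_dataset tasks_per_dataset (parse_tasks_per_dataset tasks_per_dataset)

-- ===== LEMMAS AND PROOFS =====

lemma pv_foldl_append (l : List String) : ∀ a : String, List.foldl (fun r s => r ++ s) a l = a ++ List.foldl (fun r s => r ++ s) "" l := by
  induction l with
  | nil => intro a; simp
  | cons x xs ih =>
    intro a
    simp only [List.foldl_cons]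
    rw [ih (a ++ x), ih ("" ++ x)]
    simp [String.append_assoc]

lemma pv_join_nil : String.join ([] : List String) = "" := rfl

lemma pv_join_cons (a : String) (l : List String) : String.join (a :: l) = a ++ String.join l := by
  simp only [String.join, List.foldl_cons]
  rw [pv_foldl_append l ("" ++ a)]
  simp

-- what the inner (per-dict) fold of A does to a state, phrased in B's declarative passes
def pvSpecIn (st : PvStA) (l : List (String × Int)) : PvStA :=
  { text := st.text ++ String.join (l.filterMap (fun kv => pvTemplate kv.1 kv.2)),
    coords := st.coords + ((l.filter (fun kv => kv.1 == "G" || kv.1 == "H")).map (fun kv => if kv.1 == "G" then (1:Int) else 2)).sum,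
    objs := st.objs ++ l.filterMap (fun kv => if kv.1 == "O" then some kv.2 else none),
    classes := st.classes ++ l.filterMap (fun kv => if pvClsKeys.contains kv.1 then some kv.2 else none),
    cats := st.cats ++ l.filterMap (fun kv => if kv.1 == "C" then some kv.2 else none),
    cls := st.cls + (l.countP (fun kv => pvClsKeys.contains kv.1) : Int),
    g := st.g + (l.countP (fun kv => kv.1 == "G") : Int),
    h := st.h + (l.countP (fun kv => kv.1 == "H") : Int),
    o := st.o + (l.countP (fun kv => kv.1 == "O") : Int),
    c := st.c + (l.countP (fun kv => kv.1 == "C") : Int) }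

set_option maxHeartbeats 1000000 in
lemma pv_inner (l : List (String × Int)) : ∀ st : PvStA, l.foldl pvStepA st = pvSpecIn st l := by
  induction l with
  | nil => intro st; simp [pvSpecIn, pv_join_nil]
  | cons kv rest ih =>
    intro st
    simp only [List.foldl_cons, ih]
    unfold pvStepA pvSpecIn
    split_ifs with h1 h2 h3 h4 h5 h6 h7 h8 <;>
      simp_all [pvClsKeys, pvTemplate, pv_join_cons, String.append_assoc, add_assoc, add_comm]

-- what the whole outer fold of A does to a state
def pvSpecOut (st : PvStA) (tpd : List (List (String × Int))) (s : Int) : PvStA :=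
  { pvSpecIn st (tpd.flatMap (fun td => td)) with
    text := st.text ++ String.join ((PySem.List.enumerate tpd s).map (fun p =>
      "\nDataset " ++ PySem.Int.toStr p.1 ++ "\n" ++ String.join (p.2.filterMap (fun kv => pvTemplate kv.1 kv.2)))) }

lemma pv_outer (tpd : List (List (String × Int))) : ∀ (s : Int) (st : PvStA),
    (PySem.List.enumerate tpd s).foldl pvStepDs st = pvSpecOut st tpd s := by
  induction tpd with
  | nil => intro s st; simp [pvSpecOut, pvSpecIn, PySem.List.enumerate_nil, pv_join_nil]
  | cons td rest ih =>
    intro s st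
    rw [PySem.List.enumerate_cons, List.foldl_cons, pvStepDs, pv_inner, ih]
    unfold pvSpecOut pvSpecIn
    simp [PySem.List.enumerate_cons, pv_join_cons, String.append_assoc, List.filterMap_append,
      List.countP_append, List.filter_append, add_assoc]

-- ===== VERDICT (by name: the statement is the Claim_ definition above) =====
theorem parse_tasks_per_dataset_spec : Claim_equal_parse_tasks_per_dataset := by
  intro tpd _
  unfold Spec_parse_tasks_per_dataset parse_tasks_per_dataset parse_tasks_per_dataset_alt
  rw [pv_outer]
  simp [pvSpecOut, pvSpecIn]
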